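-- pv_equiv track=rewrite | github.com/cchostak/python-vuln-hunter | vuln_hunter/utils/preprocessing.py | build_parallel_segments
-- ===== SOURCE A (Python) =====
-- from typing import List, Tuple
--
-- def segment_tokens(tokens: List[str], segment_len: int = 100) -> List[List[str]]:
--     """Split tokens into near-equal chunks of length segment_len."""
--     segments = []
--     for i in range(0, len(tokens), segment_len):
--         segments.append(tokens[i : i + segment_len])
--     if not segments:
--         segments = [[]]
--     return segments
--
-- def build_parallel_segments(source_tokens: List[str], bytecode_tokens: List[str], segment_len: int = 100) -> Tuple[List[List[str]], List[List[str]]]: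
--     """Create aligned segments for source and bytecode streams."""
--     src_segments = segment_tokens(source_tokens, segment_len)
--     byte_segments = segment_tokens(bytecode_tokens, segment_len)
--     max_len = max(len(src_segments), len(byte_segments))
--     while len(src_segments) < max_len:
--         src_segments.append(["<pad>"])
--     while len(byte_segments) < max_len:
--         byte_segments.append(["<pad>"])
--     return src_segments, byte_segments
-- ===== SOURCE B (Python) =====
-- from typing import List, Tuple
--
-- def build_parallel_segments(source_tokens: List[str], bytecode_tokens: List[str], segment_len: int = 100) -> Tuple[List[List[str]], List[List[str]]]:
--     """Create aligned segments by co-iterating both streams, peeling one chunk of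
--     each per step and emitting a pad for an already-exhausted stream."""
--     src_out = [source_tokens[:segment_len]]
--     byte_out = [bytecode_tokens[:segment_len]]
--     s = source_tokens[segment_len:]
--     b = bytecode_tokens[segment_len:]
--     while s or b:
--         src_out.append(s[:segment_len] if s else ["<pad>"])
--         byte_out.append(b[:segment_len] if b else ["<pad>"])
--         s = s[segment_len:]
--         b = b[segment_len:]
--     return src_out, byte_out
-- ===== Notes on version B (the rewrite author's own statement) =====
-- stated objective: simpler
-- what changed: Replaces the per-stream staged pipeline (segment_tokens helper chunking each stream by index range, empty-list patch, then two while-loops appending pads) with a single co-iterating loop that peels one chunk off each remaining stream per step and emits ['<pad>'] inline for a stream that is already exhausted, so no segment counts or lengths are ever computed or compared.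
-- outside the precondition, e.g. on build_parallel_segments(['a', 'b', 'c'], [], -1): A returns ([[]], [[]]), B does not finish within the time limit
import Mathlib
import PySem

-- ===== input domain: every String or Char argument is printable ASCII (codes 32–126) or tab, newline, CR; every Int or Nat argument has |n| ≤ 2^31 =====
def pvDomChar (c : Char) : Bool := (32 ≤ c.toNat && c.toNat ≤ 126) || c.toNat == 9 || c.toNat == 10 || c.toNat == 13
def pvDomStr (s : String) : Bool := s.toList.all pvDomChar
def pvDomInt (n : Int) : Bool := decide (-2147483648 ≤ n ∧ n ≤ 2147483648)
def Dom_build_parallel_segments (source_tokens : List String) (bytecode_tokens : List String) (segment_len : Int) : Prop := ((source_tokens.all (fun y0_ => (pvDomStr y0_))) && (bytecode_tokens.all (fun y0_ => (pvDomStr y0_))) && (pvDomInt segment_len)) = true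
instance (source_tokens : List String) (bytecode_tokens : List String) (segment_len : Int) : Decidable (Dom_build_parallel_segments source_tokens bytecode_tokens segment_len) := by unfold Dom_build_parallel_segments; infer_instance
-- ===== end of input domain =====

-- B replaces the staged pipeline (per-stream chunking helper, then while-padding) with one
-- co-iterating loop that peels a chunk off each stream per step, padding exhausted streams
-- inline (objective: simpler). Equivalence proved for positive segment_len (Pre_).


-- ===== PORT A =====
-- segment_tokens: chunking loop over range(0, len, step), then the empty patch
def pvSegmentTokens (tokens : List String) (segment_len : Int) : List (List String) :=
  let segments := (PySem.List.pyRange 0 (tokens.length : Int) segment_len).foldl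
    (fun acc i => acc ++ [PySem.List.slice tokens (some i) (some (i + segment_len))]) []
  if segments = [] then [[]] else segments

-- the 'while len(segs) < max_len: segs.append(["<pad>"])' loop
def pvPadWhile (segs : List (List String)) (max_len : Nat) : List (List String) :=
  if segs.length < max_len then pvPadWhile (segs ++ [["<pad>"]]) max_len else segs
termination_by max_len - segs.length
decreasing_by simp; omega

def build_parallel_segments (source_tokens : List String) (bytecode_tokens : List String) (segment_len : Int) : List (List String) × List (List String) :=
  let src_segments := pvSegmentTokens source_tokens segment_len
  let byte_segments := pvSegmentTokens bytecode_tokens segment_len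
  let max_len := max src_segments.length byte_segments.length
  (pvPadWhile src_segments max_len, pvPadWhile byte_segments max_len)

-- ===== PORT B =====
-- the 'while s or b: append chunk-or-pad to each; s, b = s[L:], b[L:]' loop.
-- Fuel |s|+|b| is a totality guard only: for segment_len ≥ 1 each iteration consumes
-- at least one token, so the fuel is never exhausted on inputs satisfying Pre_.
def pvLoopB : Nat → List String → List String → List (List String) → List (List String) → Int → List (List String) × List (List String)
  | 0, _, _, aS, aB, _ => (aS, aB)
  | fuel + 1, s, b, aS, aB, L =>
    if s = [] ∧ b = [] then (aS, aB)
    else pvLoopB fuel (PySem.List.slice s (some L) none) (PySem.List.slice b (some L) none)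
      (aS ++ [if s ≠ [] then PySem.List.slice s none (some L) else ["<pad>"]])
      (aB ++ [if b ≠ [] then PySem.List.slice b none (some L) else ["<pad>"]]) L

def build_parallel_segments_alt (source_tokens : List String) (bytecode_tokens : List String) (segment_len : Int) : List (List String) × List (List String) :=
  let src_out := [PySem.List.slice source_tokens none (some segment_len)]
  let byte_out := [PySem.List.slice bytecode_tokens none (some segment_len)]
  let s := PySem.List.slice source_tokens (some segment_len) none
  let b := PySem.List.slice bytecode_tokens (some segment_len) none
  pvLoopB (s.length + b.length) s b src_out byte_out segment_len

-- ===== PRECONDITION & SPEC =====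
-- Pre_ restricts to the natural domain of a positive segment length: at segment_len = 0
-- A raises ValueError (range step 0), and for negative segment_len A's '[[]]' answer is an
-- artifact of range(0, len, negative) being empty, which B's consuming loop does not
-- reach (it does not terminate there).
def Pre_build_parallel_segments (source_tokens : List String) (bytecode_tokens : List String) (segment_len : Int) : Prop := 1 ≤ segment_len
instance (source_tokens : List String) (bytecode_tokens : List String) (segment_len : Int) : Decidable (Pre_build_parallel_segments source_tokens bytecode_tokens segment_len) := by unfold Pre_build_parallel_segments; infer_instance

def pvWitness_build_parallel_segments : List String × List String × Int := (["a", "b", "c"], ["x"], 2)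

def Spec_build_parallel_segments (source_tokens : List String) (bytecode_tokens : List String) (segment_len : Int) (out : List (List String) × List (List String)) : Prop := out = build_parallel_segments_alt source_tokens bytecode_tokens segment_len
instance (source_tokens : List String) (bytecode_tokens : List String) (segment_len : Int) (out : List (List String) × List (List String)) : Decidable (Spec_build_parallel_segments source_tokens bytecode_tokens segment_len out) := by unfold Spec_build_parallel_segments; infer_instance

-- ===== CLAIM (what is proved, stated in full; the proofs are below) =====
def Claim_equal_build_parallel_segments : Prop := ∀ (source_tokens : List String) (bytecode_tokens : List String) (segment_len : Int), Dom_build_parallel_segments source_tokens bytecode_tokens segment_len → Pre_build_parallel_segments source_tokens bytecode_tokens segment_len → Spec_build_parallel_segments source_tokens bytecode_tokens segment_len (build_parallel_segments source_tokens bytecode_tokens segment_len)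

-- ===== LEMMAS AND PROOFS =====

-- the Int segment count A's range loop produces
def pvCount (n seg : Int) : Int := max 1 (PySem.Int.floordiv (n + seg - 1) seg)

theorem pvCount_pos (n seg : Int) : 1 ≤ pvCount n seg := by
  simp [pvCount]

-- A's chunk list is the closed-form map over the count
theorem pvSegmentTokens_eq (tokens : List String) (seg : Int) (hs : 1 ≤ seg) :
    pvSegmentTokens tokens seg =
      (List.range (pvCount (tokens.length : Int) seg).toNat).map
        (fun j : Nat => PySem.List.slice tokens (some (seg * (j:Int))) (some (seg * (j:Int) + seg))) := by
  have h0s : (0:Int) ≤ seg := by omega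
  have hfd : PySem.Int.floordiv ((tokens.length : Int) + seg - 1) seg
      = ((tokens.length : Int) + seg - 1) / seg := by
    simp [PySem.Int.floordiv, Int.fdiv_eq_ediv, h0s]
  unfold pvSegmentTokens
  conv_lhs => rw [PySem.List.foldl_append_singleton_eq_map, List.nil_append,
    PySem.List.pyRange_of_pos _ _ (by omega : (0:Int) < seg), List.map_map]
  simp only [sub_zero, zero_add]
  rcases eq_or_ne tokens [] with rfl | hne
  · have h0 : PySem.Int.floordiv ((0:Int) + seg - 1) seg = 0 := by
      have hz : (seg - 1) / seg = 0 := Int.ediv_eq_zero_of_lt (by omega) (by omega)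
      simp [PySem.Int.floordiv, Int.fdiv_eq_ediv, h0s, hz]
    have hc : (pvCount ((List.length ([] : List String) : Int)) seg).toNat = 1 := by
      simp only [pvCount, List.length_nil, Nat.cast_zero, h0]
      omega
    rw [hc]
    norm_num [List.range_one]
    simp [PySem.List.slice, PySem.List.clampIdx]
  · have hlen : 0 < (tokens.length : Int) := by
      have := List.length_pos_iff.mpr hne; exact_mod_cast this
    have hQ : 1 ≤ ((tokens.length : Int) + seg - 1) / seg := by
      rw [Int.le_ediv_iff_mul_le (by omega)]; omega
    have hcnt : pvCount (tokens.length : Int) seg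
        = ((tokens.length : Int) + seg - 1) / seg := by
      simp only [pvCount, hfd]; omega
    rw [if_pos hlen, hcnt, if_neg]
    · exact List.map_congr_left (fun j _ => by simp)
    · simp only [List.map_eq_nil_iff, List.range_eq_nil]
      omega

-- padding with while = append replicate
theorem pvPadWhile_eq (segs : List (List String)) (m : Nat) :
    pvPadWhile segs m = segs ++ List.replicate (m - segs.length) ["<pad>"] := by
  rw [pvPadWhile]
  split_ifs with h
  · rw [pvPadWhile_eq]
    have hk : m - segs.length = (m - (segs.length + 1)) + 1 := by omega
    rw [hk, List.replicate_succ]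
    simp
  · have hk : m - segs.length = 0 := by omega
    simp [hk]
termination_by m - segs.length
decreasing_by simp; omega

-- the canonical chunk list of a stream: chunks of size k+1, none for the empty stream
def pvChunks (k : Nat) : List String → List (List String)
  | [] => []
  | x :: t => (x :: t).take (k + 1) :: pvChunks k ((x :: t).drop (k + 1))
termination_by s => s.length
decreasing_by simp

theorem pvChunks_nil (k : Nat) : pvChunks k [] = [] := by rw [pvChunks.eq_def]

theorem pvChunks_cons (k : Nat) (x : String) (t : List String) :
    pvChunks k (x :: t) = (x :: t).take (k + 1) :: pvChunks k ((x :: t).drop (k + 1)) := by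
  rw [pvChunks.eq_def]

-- pvCount in closed ediv form
theorem pvCount_eq (n seg : Int) (hs : 1 ≤ seg) (hn : 1 ≤ n) :
    pvCount n seg = (n - 1) / seg + 1 := by
  have hfd : PySem.Int.floordiv (n + seg - 1) seg = (n + seg - 1) / seg := by
    simp [PySem.Int.floordiv, Int.fdiv_eq_ediv]; omega
  have h1 : (n + seg - 1) / seg = (n - 1) / seg + 1 := by
    have := Int.add_mul_ediv_right (n - 1) 1 (show seg ≠ 0 by omega)
    rw [one_mul] at this
    rw [show n + seg - 1 = n - 1 + seg by ring, this]
  have h2 : 0 ≤ (n - 1) / seg := Int.ediv_nonneg (by omega) (by omega)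
  simp only [pvCount, hfd, h1]
  omega

-- shifting a slice across a dropped chunk
theorem pvSliceShift (s : List String) (L u : Int) (hL : 0 ≤ L) (hu : 0 ≤ u) :
    PySem.List.slice s (some (L + u)) (some (L + u + L)) =
      PySem.List.slice (s.drop L.toNat) (some u) (some (u + L)) := by
  rw [PySem.List.slice_toNat _ (by omega) (by omega),
    PySem.List.slice_toNat _ hu (by omega), List.drop_drop]
  have e1 : L.toNat + u.toNat = (L + u).toNat := by omega
  have e2 : (L + u + L).toNat - (L + u).toNat = (u + L).toNat - u.toNat := by omega
  rw [e1, e2]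

-- A's map-form chunk list is the canonical chunk list (nonempty stream)
theorem pvMapform (L : Int) (hL : 1 ≤ L) :
    ∀ (n : Nat) (s : List String), s.length ≤ n → s ≠ [] →
      (List.range (pvCount (s.length : Int) L).toNat).map
          (fun j : Nat => PySem.List.slice s (some (L * (j:Int))) (some (L * (j:Int) + L)))
        = pvChunks (L.toNat - 1) s := by
  intro n
  induction n with
  | zero => intro s hle hne; cases s with
    | nil => exact absurd rfl hne
    | cons x t => simp at hle
  | succ n ih =>
    intro s hle hne
    have hlen : 0 < s.length := List.length_pos_iff.mpr hne
    have hlenI : (1:Int) ≤ (s.length : Int) := by exact_mod_cast hlen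
    have hcnt := pvCount_eq (s.length : Int) L hL hlenI
    have hcpos : 1 ≤ (pvCount (s.length : Int) L).toNat := by
      have := pvCount_pos (s.length : Int) L; omega
    obtain ⟨c', hc'⟩ : ∃ c', (pvCount (s.length : Int) L).toNat = c' + 1 :=
      ⟨(pvCount (s.length : Int) L).toNat - 1, by omega⟩
    rw [hc', List.range_succ_eq_map, List.map_cons, List.map_map]
    have hhead : PySem.List.slice s (some (L * ((0:Nat):Int))) (some (L * ((0:Nat):Int) + L))
        = s.take L.toNat := by
      simp only [Nat.cast_zero, mul_zero, zero_add]
      rw [PySem.List.slice_zero_start, PySem.List.slice_to _ (by omega)]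
    have htail : ∀ j : Nat,
        PySem.List.slice s (some (L * ((Nat.succ j : Nat):Int))) (some (L * ((Nat.succ j : Nat):Int) + L))
          = PySem.List.slice (s.drop L.toNat) (some (L * (j:Int))) (some (L * (j:Int) + L)) := by
      intro j
      have e1 : L * ((Nat.succ j : Nat):Int) = L + L * (j:Int) := by push_cast; ring
      have e2 : L * ((Nat.succ j : Nat):Int) + L = L + L * (j:Int) + L := by push_cast; ring
      rw [e1]
      exact pvSliceShift s L (L * (j:Int)) (by omega) (by positivity)
    -- chunk structure on the right
    obtain ⟨x, t, rfl⟩ : ∃ x t, s = x :: t := by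
      cases s with
      | nil => exact absurd rfl hne
      | cons x t => exact ⟨x, t, rfl⟩
    rw [pvChunks_cons, (by omega : L.toNat - 1 + 1 = L.toNat)]
    refine congrArg₂ List.cons ?_ ?_
    · exact hhead
    · have hmap : ((List.range c').map Nat.succ).map
          (fun j : Nat => PySem.List.slice (x :: t) (some (L * (j:Int))) (some (L * (j:Int) + L)))
            = (List.range c').map
          (fun j : Nat => PySem.List.slice ((x :: t).drop L.toNat) (some (L * (j:Int))) (some (L * (j:Int) + L))) := by
        rw [List.map_map]
        exact List.map_congr_left (fun j _ => htail j)
      rw [← List.map_map, hmap]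
      by_cases hde : (x :: t).drop L.toNat = []
      · -- stream exhausted after the first chunk: c' = 0
        have hle' : (x :: t).length ≤ L.toNat := by
          have := List.drop_eq_nil_iff.mp hde; omega
        have hz : ((x :: t).length : Int) - 1 < L := by
          have : ((x :: t).length : Int) ≤ L := by omega
          omega
        have hdiv : (((x :: t).length : Int) - 1) / L = 0 :=
          Int.ediv_eq_zero_of_lt (by omega) hz
        have hc0 : c' = 0 := by
          rw [hcnt, hdiv] at hc'; omega
        rw [hc0, hde, pvChunks_nil]
        simp
      · -- recurse on the dropped stream
        have hlt : (x :: t).length > L.toNat := by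
          by_contra hcon
          exact hde (List.drop_eq_nil_iff.mpr (by omega))
        have hdlen : ((x :: t).drop L.toNat).length = (x :: t).length - L.toNat := by
          simp
        have hcnt' : pvCount (((x :: t).drop L.toNat).length : Int) L
            = pvCount ((x :: t).length : Int) L - 1 := by
          have hd1 : (1:Int) ≤ (((x :: t).drop L.toNat).length : Int) := by
            have : 0 < ((x :: t).drop L.toNat).length := List.length_pos_iff.mpr hde
            exact_mod_cast this
          rw [pvCount_eq _ _ hL hd1, hcnt]
          have he : ((x :: t).length : Int) - 1
              = ((((x :: t).drop L.toNat).length : Int) - 1) + 1 * L := by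
            rw [hdlen]; push_cast [Nat.cast_sub (by omega : L.toNat ≤ (x :: t).length)]
            omega
          rw [show ((x :: t).length : Int) - 1 = ((((x :: t).drop L.toNat).length : Int) - 1) + 1 * L from he,
            Int.add_mul_ediv_right _ _ (show L ≠ 0 by omega)]
          ring
        have hc'' : (pvCount (((x :: t).drop L.toNat).length : Int) L).toNat = c' := by
          rw [hcnt']
          have := pvCount_pos ((x :: t).length : Int) L
          omega
        rw [← hc'']
        exact ih ((x :: t).drop L.toNat) (by simp at hle ⊢; omega) hde

-- segment_tokens produces exactly first-chunk :: canonical chunks of the rest, for every stream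
theorem pvSegmentTokens_chunks (s : List String) (L : Int) (hL : 1 ≤ L) :
    pvSegmentTokens s L = s.take L.toNat :: pvChunks (L.toNat - 1) (s.drop L.toNat) := by
  rcases eq_or_ne s [] with rfl | hne
  · rw [pvSegmentTokens_eq [] L hL]
    have hc : (pvCount ((List.length ([] : List String)) : Int) L).toNat = 1 := by
      simp only [List.length_nil, Nat.cast_zero, pvCount]
      have hfd : PySem.Int.floordiv ((0:Int) + L - 1) L = (L - 1) / L := by
        simp [PySem.Int.floordiv, Int.fdiv_eq_ediv]; omega
      have hz : (L - 1) / L = 0 := Int.ediv_eq_zero_of_lt (by omega) (by omega)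
      rw [hfd, hz]; rfl
    rw [hc]
    simp [List.range_one, pvChunks_nil, PySem.List.slice, PySem.List.clampIdx]
  · rw [pvSegmentTokens_eq s L hL, pvMapform L hL s.length s le_rfl hne]
    obtain ⟨x, t, rfl⟩ : ∃ x t, s = x :: t := by
      cases s with
      | nil => exact absurd rfl hne
      | cons x t => exact ⟨x, t, rfl⟩
    rw [pvChunks_cons, (by omega : L.toNat - 1 + 1 = L.toNat)]

-- B's loop, characterised: chunks of what remains, then pads up to the longer side
theorem pvLoopB_eq (L : Int) (hL : 1 ≤ L) :
    ∀ (fuel : Nat) (s b : List String) (aS aB : List (List String)),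
      s.length + b.length ≤ fuel →
      pvLoopB fuel s b aS aB L =
        (aS ++ (pvChunks (L.toNat - 1) s ++
            List.replicate (max (pvChunks (L.toNat - 1) s).length (pvChunks (L.toNat - 1) b).length
              - (pvChunks (L.toNat - 1) s).length) ["<pad>"]),
         aB ++ (pvChunks (L.toNat - 1) b ++
            List.replicate (max (pvChunks (L.toNat - 1) s).length (pvChunks (L.toNat - 1) b).length
              - (pvChunks (L.toNat - 1) b).length) ["<pad>"])) := by
  intro fuel
  induction fuel with
  | zero =>
    intro s b aS aB hf
    have hs : s = [] := List.eq_nil_of_length_eq_zero (by omega)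
    have hb : b = [] := List.eq_nil_of_length_eq_zero (by omega)
    subst hs; subst hb
    simp [pvLoopB, pvChunks_nil]
  | succ fuel ih =>
    intro s b aS aB hf
    rw [pvLoopB]
    by_cases hsb : s = [] ∧ b = []
    · obtain ⟨rfl, rfl⟩ := hsb
      simp [pvChunks_nil]
    · rw [if_neg hsb]
      have hk1 : L.toNat - 1 + 1 = L.toNat := by omega
      have hsl : PySem.List.slice s (some L) none = s.drop L.toNat :=
        PySem.List.slice_from _ (by omega)
      have hbl : PySem.List.slice b (some L) none = b.drop L.toNat :=
        PySem.List.slice_from _ (by omega)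
      have hfuel : (s.drop L.toNat).length + (b.drop L.toNat).length ≤ fuel := by
        simp only [List.length_drop]
        rcases not_and_or.mp hsb with h | h
        · have : 0 < s.length := List.length_pos_iff.mpr h
          omega
        · have : 0 < b.length := List.length_pos_iff.mpr h
          omega
      rw [hsl, hbl, ih (s.drop L.toNat) (b.drop L.toNat) _ _ hfuel]
      -- unfold one chunk on each nonempty side
      have chunk_step : ∀ u : List String, u ≠ [] →
          pvChunks (L.toNat - 1) u = u.take L.toNat :: pvChunks (L.toNat - 1) (u.drop L.toNat) := by
        intro u hu
        obtain ⟨x, t, rfl⟩ : ∃ x t, u = x :: t := by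
          cases u with
          | nil => exact absurd rfl hu
          | cons x t => exact ⟨x, t, rfl⟩
        rw [pvChunks_cons, hk1]
      have take_eq : ∀ u : List String,
          PySem.List.slice u none (some L) = u.take L.toNat := fun u =>
        PySem.List.slice_to _ (by omega)
      rcases eq_or_ne s [] with rfl | hs <;> rcases eq_or_ne b [] with rfl | hb
      · exact absurd ⟨rfl, rfl⟩ hsb
      · -- s exhausted, b not
        rw [chunk_step b hb, if_neg (by simp), if_pos hb, take_eq b]
        simp only [List.drop_nil, pvChunks_nil, List.length_nil, List.length_cons,
          Nat.zero_max, Nat.sub_zero, Nat.sub_self, Prod.mk.injEq]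
        refine ⟨?_, ?_⟩
        · rw [List.replicate_succ]
          simp
        · simp
      · -- b exhausted, s not
        rw [chunk_step s hs, if_pos hs, if_neg (by simp), take_eq s]
        simp only [List.drop_nil, pvChunks_nil, List.length_nil, List.length_cons,
          Nat.max_zero, Nat.sub_zero, Nat.sub_self, Prod.mk.injEq]
        refine ⟨?_, ?_⟩
        · simp
        · rw [List.replicate_succ]
          simp
      · -- both still nonempty
        rw [chunk_step s hs, chunk_step b hb, if_pos hs, if_pos hb, take_eq s, take_eq b]
        simp only [List.length_cons, Nat.succ_max_succ, Nat.succ_sub_succ, Prod.mk.injEq]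
        refine ⟨?_, ?_⟩ <;> simp [List.append_assoc]

-- ===== VERDICT (by name: the statement is the Claim_ definition above) =====
theorem build_parallel_segments_spec : Claim_equal_build_parallel_segments := by
  intro src byt L _hd hL
  have hL' : (1:Int) ≤ L := hL
  unfold Spec_build_parallel_segments build_parallel_segments build_parallel_segments_alt
  have hsl : PySem.List.slice src (some L) none = src.drop L.toNat :=
    PySem.List.slice_from _ (by omega)
  have hbl : PySem.List.slice byt (some L) none = byt.drop L.toNat :=
    PySem.List.slice_from _ (by omega)
  have htk : ∀ u : List String, PySem.List.slice u none (some L) = u.take L.toNat := fun u =>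
    PySem.List.slice_to _ (by omega)
  simp only [hsl, hbl, htk]
  rw [pvLoopB_eq L hL' _ _ _ _ _ le_rfl,
    pvSegmentTokens_chunks src L hL', pvSegmentTokens_chunks byt L hL',
    pvPadWhile_eq, pvPadWhile_eq]
  simp only [List.length_cons, Nat.succ_max_succ, Nat.succ_sub_succ, Prod.mk.injEq]
  refine ⟨?_, ?_⟩ <;> simp
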